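-- pv_equiv track=rewrite | github.com/Julesc013/dominium | control/ir/control_ir_verifier.py | _cycle_nodes
-- ===== SOURCE A (Python) =====
-- from typing import Dict, Iterable, List, Mapping, MutableMapping, Sequence, Tuple
--
-- def _cycle_nodes(graph: Mapping[str, List[str]]) -> List[str]:
--     visited: set = set()
--     stack: set = set()
--     cycles: set = set()
--
--     def dfs(node_id: str) -> None:
--         visited.add(node_id)
--         stack.add(node_id)
--         for next_id in list(graph.get(node_id, [])):
--             if next_id not in graph:
--                 continue
--             if next_id not in visited:
--                 dfs(next_id)
--                 continue
--             if next_id in stack: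
--                 cycles.add(node_id)
--                 cycles.add(next_id)
--         stack.remove(node_id)
--
--     for node_id in sorted(graph.keys()):
--         if node_id in visited:
--             continue
--         dfs(node_id)
--     return sorted(cycles)
-- ===== SOURCE B (Python) =====
-- def _cycle_nodes(graph):
--     # Iterative DFS with an explicit frame stack instead of recursion.
--     visited = set()
--     path = set()
--     cycles = set()
--     for root in sorted(graph.keys()):
--         if root in visited:
--             continue
--         visited.add(root)
--         path.add(root)
--         stack = [(root, list(graph.get(root, [])))]
--         while stack:
--             node, todo = stack[-1]
--             if not todo:
--                 path.remove(node)
--                 stack.pop()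
--                 continue
--             nxt = todo.pop(0)
--             if nxt not in graph:
--                 continue
--             if nxt not in visited:
--                 visited.add(nxt)
--                 path.add(nxt)
--                 stack.append((nxt, list(graph.get(nxt, []))))
--             elif nxt in path:
--                 cycles.add(node)
--                 cycles.add(nxt)
--     return sorted(cycles)
-- ===== Notes on version B (the rewrite author's own statement) =====
-- stated objective: alternative
-- what changed: The recursive DFS (closure mutating shared sets) is replaced by an iterative DFS with an explicit stack of (node, remaining-neighbours) frames, removing recursion (and Python's recursion-depth limit) while preserving the exact visit order.
import Mathlib
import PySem

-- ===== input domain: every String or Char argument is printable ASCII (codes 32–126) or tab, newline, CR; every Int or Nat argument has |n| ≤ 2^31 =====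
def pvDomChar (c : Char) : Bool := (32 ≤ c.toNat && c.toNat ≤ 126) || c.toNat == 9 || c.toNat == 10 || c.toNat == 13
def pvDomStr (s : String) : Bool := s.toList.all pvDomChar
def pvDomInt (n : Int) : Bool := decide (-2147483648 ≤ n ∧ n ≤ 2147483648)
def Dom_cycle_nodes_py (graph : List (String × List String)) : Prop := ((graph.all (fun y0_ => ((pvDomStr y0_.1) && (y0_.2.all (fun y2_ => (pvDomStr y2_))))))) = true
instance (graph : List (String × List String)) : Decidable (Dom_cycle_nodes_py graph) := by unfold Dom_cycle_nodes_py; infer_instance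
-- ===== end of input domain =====

-- B replaces A's recursive DFS by an iterative explicit-stack DFS with the same visit order (objective: alternative).


-- shared DFS state: the three Python sets (visited, stack/path, cycles)
structure CnSt where
  visited : PySem.Set String
  path : PySem.Set String
  cycles : PySem.Set String
deriving Repr, DecidableEq

-- ===== PORT A =====
-- A's recursive dfs; the Nat is a fuel-style totality guard for the recursion depth
-- (depth is bounded by the number of keys, so the 0 branch is never reached from cycle_nodes_py).
mutual
def cnDfsA (g : List (String × List String)) (fuel : Nat) (node : String) (st : CnSt) : CnSt :=
  match fuel with
  | 0 => st
  | f + 1 =>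
    -- visited.add(node); stack.add(node)
    let st1 : CnSt := ⟨PySem.Set.add st.visited node, PySem.Set.add st.path node, st.cycles⟩
    let st2 := cnLoopA g f node (PySem.Dict.getD (PySem.Dict.mk g) node []) st1
    -- stack.remove(node) (node is always present here, so remove = discard)
    ⟨st2.visited, PySem.Set.discard st2.path node, st2.cycles⟩
termination_by (fuel, 0)

-- the 'for next_id in list(graph.get(node_id, []))' loop of dfs
def cnLoopA (g : List (String × List String)) (f : Nat) (node : String) (ns : List String) (st : CnSt) : CnSt :=
  match ns with
  | [] => st
  | nx :: rest =>
    if !(PySem.Dict.contains (PySem.Dict.mk g) nx) then cnLoopA g f node rest st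
    else if !(PySem.Set.contains st.visited nx) then cnLoopA g f node rest (cnDfsA g f nx st)
    else if PySem.Set.contains st.path nx then
      cnLoopA g f node rest ⟨st.visited, st.path, PySem.Set.add (PySem.Set.add st.cycles node) nx⟩
    else cnLoopA g f node rest st
termination_by (f, ns.length + 1)
end

def cycle_nodes_py (graph : List (String × List String)) : List String :=
  PySem.List.sorted
    (((PySem.List.sorted (PySem.Dict.keys (PySem.Dict.mk graph)) (fun x => x) false).foldl
      (fun st node =>
        if PySem.Set.contains st.visited node then st
        else cnDfsA graph graph.length node st)
      ⟨[], [], []⟩).cycles)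
    (fun x => x) false

-- ===== PORT B =====
-- the maximal neighbour-list length in g (used only by runB's termination measure)
def cnMaxDeg (g : List (String × List String)) : Nat := g.foldl (fun a p => max a p.2.length) 0

-- termination weights for runB's frame stack (proof device, not part of the algorithm)
def cnW (L : Nat) : Nat → Nat
  | 0 => 1
  | k + 1 => (L + 1) * cnW L k + 2

def cnFrameW (L : Nat) (fr : Nat × String × List String) : Nat := (fr.2.2.length + 1) * cnW L fr.1 + 1

theorem cnW_pos (L k : Nat) : 0 < cnW L k := by
  cases k with
  | zero => simp [cnW]
  | succ k => exact Nat.lt_of_lt_of_le (by omega) (Nat.le_add_left 2 _)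

theorem cn_len_getD_le (g : List (String × List String)) (x : String) :
    (PySem.Dict.getD (PySem.Dict.mk g) x []).length ≤ cnMaxDeg g := by
  rw [PySem.Dict.getD_eq_get?_getD]
  cases hv : PySem.Dict.get? (PySem.Dict.mk g) x with
  | none => simp
  | some v =>
    have hm := PySem.Dict.mem_items_of_get?_eq_some _ hv
    have h2 := (PySem.List.le_foldl_max_nat g (fun p => p.2.length) 0).2 (x, v) (by simpa using hm)
    simpa [cnMaxDeg] using h2

-- Source B: iterative DFS over an explicit stack of (node, remaining-neighbours) frames.
-- The Nat in each frame is a fuel-style totality guard mirroring the depth bound, never reached.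
def cnRunB (g : List (String × List String)) (frames : List (Nat × String × List String)) (st : CnSt) : CnSt :=
  match frames with
  | [] => st
  | (k, node, ns) :: rest =>
    match ns with
    | [] => cnRunB g rest ⟨st.visited, PySem.Set.discard st.path node, st.cycles⟩
    | nx :: tl =>
      if !(PySem.Dict.contains (PySem.Dict.mk g) nx) then cnRunB g ((k, node, tl) :: rest) st
      else if !(PySem.Set.contains st.visited nx) then
        match k with
        | 0 => cnRunB g ((0, node, tl) :: rest) st
        | f + 1 =>
          cnRunB g ((f, nx, PySem.Dict.getD (PySem.Dict.mk g) nx []) :: (f + 1, node, tl) :: rest)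
            ⟨PySem.Set.add st.visited nx, PySem.Set.add st.path nx, st.cycles⟩
      else if PySem.Set.contains st.path nx then
        cnRunB g ((k, node, tl) :: rest) ⟨st.visited, st.path, PySem.Set.add (PySem.Set.add st.cycles node) nx⟩
      else cnRunB g ((k, node, tl) :: rest) st
termination_by (frames.map (cnFrameW (cnMaxDeg g))).sum
decreasing_by
  all_goals simp [cnFrameW, cnW]
  all_goals
    first
      | (have hm := cn_len_getD_le g nx
         nlinarith [Nat.mul_le_mul_right (cnW (cnMaxDeg g) f) hm])
      | (have hw := cnW_pos (cnMaxDeg g) k; nlinarith)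

def cycle_nodes_py_alt (graph : List (String × List String)) : List String :=
  PySem.List.sorted
    (((PySem.List.sorted (PySem.Dict.keys (PySem.Dict.mk graph)) (fun x => x) false).foldl
      (fun st root =>
        if PySem.Set.contains st.visited root then st
        else cnRunB graph [(graph.length - 1, root, PySem.Dict.getD (PySem.Dict.mk graph) root [])]
          ⟨PySem.Set.add st.visited root, PySem.Set.add st.path root, st.cycles⟩)
      ⟨[], [], []⟩).cycles)
    (fun x => x) false

-- ===== PRECONDITION & SPEC =====
def Spec_cycle_nodes_py (graph : List (String × List String)) (out : List String) : Prop := out = cycle_nodes_py_alt graph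
instance (graph : List (String × List String)) (out : List String) : Decidable (Spec_cycle_nodes_py graph out) := by unfold Spec_cycle_nodes_py; infer_instance

-- ===== CLAIM (what is proved, stated in full; the proofs are below) =====
def Claim_equal_cycle_nodes_py : Prop := ∀ (graph : List (String × List String)), Dom_cycle_nodes_py graph → Spec_cycle_nodes_py graph (cycle_nodes_py graph)

-- ===== LEMMAS AND PROOFS =====

-- 'pop the frame': the state transform applied when a frame is exhausted
def cnExit (node : String) (st : CnSt) : CnSt := ⟨st.visited, PySem.Set.discard st.path node, st.cycles⟩

-- the simulation: running B's loop with a top frame (k, node, ns) processes exactly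
-- A's neighbour loop for node (at fuel k) and then pops
theorem cnSim (g : List (String × List String)) (k : Nat) (node : String) (ns : List String)
    (rest : List (Nat × String × List String)) (st : CnSt) :
    cnRunB g ((k, node, ns) :: rest) st = cnRunB g rest (cnExit node (cnLoopA g k node ns st)) := by
  induction k generalizing node ns rest st with
  | zero =>
    induction ns generalizing rest st with
    | nil =>
      conv_lhs => rw [cnRunB.eq_def]
      simp [cnLoopA, cnExit]
    | cons nx tl ih =>
      conv_lhs => rw [cnRunB.eq_def]
      conv_rhs => rw [cnLoopA.eq_def]
      by_cases h1 : PySem.Dict.contains (PySem.Dict.mk g) nx = true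
      · by_cases h2 : PySem.Set.contains st.visited nx = true
        · by_cases h3 : PySem.Set.contains st.path nx = true
          · simp only [h1, h2, h3]
            simp only [Bool.not_true, if_false, if_true]
            exact ih _ _
          · simp only [h1, h2, h3]
            simp only [Bool.not_true, if_false, if_true]
            exact ih _ _
        · simp only [h1, Bool.not_eq_true] at *
          simp only [h1, h2]
          simp only [Bool.not_false, if_true]
          rw [cnDfsA.eq_def]
          exact ih _ _
      · simp only [Bool.not_eq_true] at h1
        simp only [h1]
        simp only [Bool.not_false, if_true]
        exact ih _ _
  | succ f ihk =>
    induction ns generalizing rest st with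
    | nil =>
      conv_lhs => rw [cnRunB.eq_def]
      simp [cnLoopA, cnExit]
    | cons nx tl ih =>
      conv_lhs => rw [cnRunB.eq_def]
      conv_rhs => rw [cnLoopA.eq_def]
      by_cases h1 : PySem.Dict.contains (PySem.Dict.mk g) nx = true
      · by_cases h2 : PySem.Set.contains st.visited nx = true
        · by_cases h3 : PySem.Set.contains st.path nx = true
          · simp only [h1, h2, h3]
            simp only [Bool.not_true, if_false, if_true]
            exact ih _ _
          · simp only [h1, h2, h3]
            simp only [Bool.not_true, if_false, if_true]
            exact ih _ _
        · simp only [h1, h2]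
          simp only [Bool.not_true, Bool.not_false, if_true]
          rw [ihk, ih, cnDfsA.eq_def]
          simp
          rw [ih]
          rfl
      · simp only [Bool.not_eq_true] at h1
        simp only [h1]
        simp only [Bool.not_false, if_true]
        exact ih _ _

theorem cn_top (g : List (String × List String)) (f : Nat) (root : String) (st : CnSt) :
    cnRunB g [(f, root, PySem.Dict.getD (PySem.Dict.mk g) root [])]
        ⟨PySem.Set.add st.visited root, PySem.Set.add st.path root, st.cycles⟩
      = cnDfsA g (f + 1) root st := by
  rw [cnSim]
  simp [cnRunB, cnDfsA, cnExit]

-- ===== VERDICT (by name: the statement is the Claim_ definition above) =====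
theorem cycle_nodes_py_spec : Claim_equal_cycle_nodes_py := by
  intro graph _
  unfold Spec_cycle_nodes_py cycle_nodes_py cycle_nodes_py_alt
  cases graph with
  | nil => rfl
  | cons p t =>
    simp only [List.length_cons, Nat.add_sub_cancel]
    refine congrArg (fun z : CnSt => PySem.List.sorted z.cycles (fun x => x) false) ?_
    refine PySem.List.foldl_congr_mem _ _ _ _ ?_
    intro st node _
    by_cases h : PySem.Set.contains st.visited node = true
    · simp only [h, if_true]
    · rw [if_neg h, if_neg h]
      exact (cn_top (p :: t) t.length node st).symm
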